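-- pv_equiv track=rewrite | github.com/Ksavva1021/TIDAL | scripts/get_trigger_signal_acceptance.py | highlight_max
-- ===== SOURCE A (Python) =====
-- def highlight_max(data):
--     """Highlight the maximum value in each column."""
--     max_values = [max(col) for col in zip(*data)]
--     highlighted_data = []
--     for row in data:
--         highlighted_row = []
--         for value, max_value in zip(row, max_values):
--             if value == max_value:
--                 highlighted_row.append(f"\033[91m{value}\033[0m")  # Red color
--             else:
--                 highlighted_row.append(str(value))
--         highlighted_data.append(highlighted_row)
--     return highlighted_data
-- ===== SOURCE B (Python) =====
-- def highlight_max(data):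
--     """Highlight the maximum value in each column (in-place column sweep)."""
--     result = [[] for _ in data]
--     j = 0
--     while data and all(len(r) > j for r in data):
--         col = [r[j] for r in data]
--         m = max(col)
--         for out, v in zip(result, col):
--             out.append(f"\033[91m{v}\033[0m" if v == m else str(v))
--         j += 1
--     return result
-- ===== Notes on version B (the rewrite author's own statement) =====
-- stated objective: alternative
-- what changed: B sweeps columns with a while loop, growing each output row in place by appending one highlighted cell per column (max recomputed per column), instead of A's precomputed column-max vector consumed row-by-row with zip.
import Mathlib
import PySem

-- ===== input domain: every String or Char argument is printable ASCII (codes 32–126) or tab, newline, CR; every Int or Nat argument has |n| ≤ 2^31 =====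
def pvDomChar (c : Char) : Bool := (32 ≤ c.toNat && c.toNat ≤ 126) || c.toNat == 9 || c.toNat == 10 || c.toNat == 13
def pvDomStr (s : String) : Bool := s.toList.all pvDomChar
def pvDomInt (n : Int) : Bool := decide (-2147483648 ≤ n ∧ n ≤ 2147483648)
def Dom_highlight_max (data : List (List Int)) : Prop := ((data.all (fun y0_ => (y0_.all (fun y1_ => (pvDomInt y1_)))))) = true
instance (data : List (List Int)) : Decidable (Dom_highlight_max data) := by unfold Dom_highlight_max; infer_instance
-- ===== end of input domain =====

-- B sweeps columns with a while loop, growing each output row in place by appending one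
-- highlighted cell per column (max recomputed per column), instead of A's precomputed
-- column-max vector consumed row-by-row with zip; same cost, different decomposition.

-- Shared tiny helper: the red-highlighted rendering of an int.
def pvRed (v : Int) : String := "\x1b[91m" ++ PySem.Int.toStr v ++ "\x1b[0m"

-- ===== PORT A =====
-- Number of columns zip(*rows) yields: 0 for no rows, else the minimum row length.
def pvNumCols : List (List Int) → Nat
  | [] => 0
  | r :: rs => rs.foldl (fun m s => min m s.length) r.length

-- Python's zip(*data): the list of columns, truncated to the shortest row.
def pvZipStar (rows : List (List Int)) : List (List Int) :=
  (List.range (pvNumCols rows)).map (fun j => rows.map (fun r => r.getD j 0))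

def highlight_max (data : List (List Int)) : List (List String) :=
  let maxValues := (pvZipStar data).map (fun col => (PySem.List.max? col (fun y => y)).getD 0)
  data.map (fun row =>
    (row.zip maxValues).map (fun p =>
      if p.1 = p.2 then pvRed p.1 else PySem.Int.toStr p.1))

-- ===== PORT B =====
-- The while loop of Source B: while data and all(len(r) > j for r in data), append one cell of
-- column j to every accumulated output row.  fuel only makes the recursion structural; the
-- loop in fact stops at the j-condition.
def highlight_max_alt_loop (data : List (List Int)) :
    Nat → Nat → List (List String) → List (List String)
  | 0, _, acc => acc
  | fuel + 1, j, acc =>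
    if data ≠ [] ∧ data.all (fun r => decide (j < r.length)) then
      let col := data.map (fun r => r.getD j 0)
      let m := (PySem.List.max? col (fun y => y)).getD 0
      highlight_max_alt_loop data fuel (j + 1)
        (List.zipWith (fun out v =>
          out ++ [if v = m then pvRed v else PySem.Int.toStr v]) acc col)
    else acc

def highlight_max_alt (data : List (List Int)) : List (List String) :=
  highlight_max_alt_loop data ((data.headD []).length + 1) 0 (data.map (fun _ => []))

-- ===== PRECONDITION & SPEC =====
def Spec_highlight_max (data : List (List Int)) (out : List (List String)) : Prop := out = highlight_max_alt data
instance (data : List (List Int)) (out : List (List String)) : Decidable (Spec_highlight_max data out) := by unfold Spec_highlight_max; infer_instance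

-- ===== CLAIM (what is proved, stated in full; the proofs are below) =====
def Claim_equal_highlight_max : Prop := ∀ (data : List (List Int)), Dom_highlight_max data → Spec_highlight_max data (highlight_max data)

-- ===== LEMMAS AND PROOFS =====

-- Canonical description both programs are reduced to.
def pvColMax (data : List (List Int)) (j : Nat) : Int :=
  (PySem.List.max? (data.map (fun r => r.getD j 0)) (fun y => y)).getD 0

def pvCell (data : List (List Int)) (row : List Int) (j : Nat) : String :=
  if row.getD j 0 = pvColMax data j then pvRed (row.getD j 0) else PySem.Int.toStr (row.getD j 0)

def pvCanon (data : List (List Int)) : List (List String) :=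
  data.map (fun row => (List.range' 0 (pvNumCols data)).map (fun j => pvCell data row j))

theorem pv_foldl_min_le_init (rs : List (List Int)) (a : Nat) :
    rs.foldl (fun m s => min m s.length) a ≤ a := by
  induction rs generalizing a with
  | nil => simp
  | cons r rs ih => exact le_trans (ih _) (min_le_left _ _)

theorem pv_foldl_min_le_mem (rs : List (List Int)) (a : Nat) (s : List Int) (hs : s ∈ rs) :
    rs.foldl (fun m s => min m s.length) a ≤ s.length := by
  induction rs generalizing a with
  | nil => cases hs
  | cons r rs ih =>
    rcases List.mem_cons.mp hs with rfl | h
    · exact le_trans (pv_foldl_min_le_init rs _) (min_le_right _ _)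
    · exact ih _ h

theorem pvNumCols_le (rows : List (List Int)) (r : List Int) (hr : r ∈ rows) :
    pvNumCols rows ≤ r.length := by
  cases rows with
  | nil => cases hr
  | cons x xs =>
    rcases List.mem_cons.mp hr with rfl | h
    · exact pv_foldl_min_le_init xs _
    · exact pv_foldl_min_le_mem xs x.length r h

theorem pv_lt_foldl_min (rs : List (List Int)) (a j : Nat) (ha : j < a)
    (h : ∀ s ∈ rs, j < s.length) : j < rs.foldl (fun m s => min m s.length) a := by
  induction rs generalizing a with
  | nil => simpa
  | cons r rs ih =>
    exact ih _ (lt_min ha (h r (List.mem_cons_self))) (fun s hs => h s (List.mem_cons_of_mem _ hs))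

theorem pv_lt_numCols (data : List (List Int)) (j : Nat) (hne : data ≠ [])
    (h : ∀ r ∈ data, j < r.length) : j < pvNumCols data := by
  cases data with
  | nil => exact absurd rfl hne
  | cons x xs =>
    exact pv_lt_foldl_min xs x.length j (h x (List.mem_cons_self))
      (fun s hs => h s (List.mem_cons_of_mem _ hs))

theorem pv_zipWith_fst {α β : Type} (l1 : List α) (l2 : List β) (h : l1.length ≤ l2.length) :
    List.zipWith (fun a _ => a) l1 l2 = l1 := by
  induction l1 generalizing l2 with
  | nil => simp
  | cons x xs ih =>
    cases l2 with
    | nil => simp at h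
    | cons y ys => simp_all

theorem pv_loop_eq (data : List (List Int)) (hne : data ≠ []) :
    ∀ (fuel j : Nat) (acc : List (List String)),
      pvNumCols data ≤ j + fuel → acc.length = data.length →
      highlight_max_alt_loop data fuel j acc =
        List.zipWith (fun a row =>
          a ++ (List.range' j (pvNumCols data - j)).map (fun jj => pvCell data row jj)) acc data := by
  intro fuel
  induction fuel with
  | zero =>
    intro j acc hfe hlen
    have : pvNumCols data - j = 0 := by omega
    simp only [highlight_max_alt_loop, this, List.range'_zero, List.map_nil, List.append_nil]
    exact (pv_zipWith_fst acc data (le_of_eq hlen)).symm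
  | succ fuel ih =>
    intro j acc hfe hlen
    by_cases hc : data ≠ [] ∧ data.all (fun r => decide (j < r.length))
    · have hall : ∀ r ∈ data, j < r.length := by
        intro r hr
        have := hc.2
        simp only [List.all_eq_true, decide_eq_true_eq] at this
        exact this r hr
      have hj : j < pvNumCols data := pv_lt_numCols data j hne hall
      rw [highlight_max_alt_loop, if_pos hc]
      rw [ih (j + 1) _ (by omega) (by simp [List.length_zipWith, hlen])]
      have hrange : pvNumCols data - j = (pvNumCols data - (j + 1)) + 1 := by omega
      rw [hrange, List.range'_succ]
      apply List.ext_getElem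
      · simp [List.length_zipWith, hlen]
      · intro i hi hi'
        simp only [List.length_zipWith, List.length_map, hlen, min_self] at hi hi'
        simp only [List.getElem_zipWith, List.getElem_map, List.map_cons]
        simp [pvCell, pvColMax]
    · rw [highlight_max_alt_loop, if_neg hc]
      have hx : ¬ ((data.all (fun r => decide (j < r.length))) = true) := fun hb => hc ⟨hne, hb⟩
      simp only [List.all_eq_true, decide_eq_true_eq, not_forall] at hx
      obtain ⟨r, hr, hrl⟩ := hx
      have : pvNumCols data - j = 0 := by
        have := pvNumCols_le data r hr
        omega
      simp only [this, List.range'_zero, List.map_nil, List.append_nil]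
      exact (pv_zipWith_fst acc data (le_of_eq hlen)).symm

theorem pv_alt_eq_canon (data : List (List Int)) : highlight_max_alt data = pvCanon data := by
  cases data with
  | nil => rfl
  | cons x xs =>
    have hne : (x :: xs : List (List Int)) ≠ [] := by simp
    rw [highlight_max_alt, pv_loop_eq _ hne _ 0 _
      (by
        have := pvNumCols_le (x :: xs) x (List.mem_cons_self)
        simpa using by omega)
      (by simp)]
    rw [pvCanon]
    simp only [Nat.sub_zero, List.zipWith_map_left]
    rw [List.zipWith_self]
    simp

theorem pv_a_eq_canon (data : List (List Int)) : highlight_max data = pvCanon data := by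
  unfold highlight_max pvCanon
  apply List.map_congr_left
  intro row hrow
  have hrl : pvNumCols data ≤ row.length := pvNumCols_le data row hrow
  apply List.ext_getElem
  · simp [pvZipStar]
    omega
  · intro jj hj hj'
    simp only [List.length_map, List.length_range'] at hj'
    have hjr : jj < row.length := lt_of_lt_of_le hj' hrl
    simp only [List.getElem_map, List.getElem_zip, List.getElem_range', List.getElem_range,
      pvZipStar, pvCell, pvColMax]
    rw [List.getD_eq_getElem _ _ (by simpa using hjr)]
    simp

-- ===== VERDICT (by name: the statement is the Claim_ definition above) =====
theorem highlight_max_spec : Claim_equal_highlight_max := by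
  intro data _
  show highlight_max data = highlight_max_alt data
  rw [pv_a_eq_canon, pv_alt_eq_canon]
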